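-- pv_equiv track=rewrite | github.com/ssv-170379/codewars_python | solution/intro_to_art.py | get_w
-- ===== SOURCE A (Python) =====
-- def get_w(height):
--     width = (height * 4) - 3  # full width of 'w' drawing
--     v_width = (width // 2)  # width of a single v-segment (actually overlapping 1 character)
--     result = []
--     if height >= 2:  # pass "Return an empty list for height < 2" condition
--         for y in range(height):  # line_by_line
--             line = ''
--             segment_offs = 0  # start drawing leftmost 'v'
--             for x in range(width):
--                 line += '*' if (x - segment_offs == y) or (x - segment_offs == v_width - y) else ' '
--                 if x == segment_offs + v_width:  # if x is beyond current segment
--                     segment_offs += v_width  # proceed to the next v-segment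
--             result.append(line)
--     return result
-- ===== SOURCE B (Python) =====
-- def get_w(height):
--     if height < 2:
--         return []
--     width = height * 4 - 3
--     v = width // 2
--     result = []
--     for y in range(height):
--         row = [' '] * width
--         for c in (y, v - y, v + y, 2 * v - y):
--             row[c] = '*'
--         result.append(''.join(row))
--     return result
-- ===== Notes on version B (the rewrite author's own statement) =====
-- stated objective: simpler
-- what changed: Instead of scanning every column of each row with a per-column conditional and a running segment offset, B preallocates a row of spaces and directly writes the four asterisks at indices y, v-y, v+y, 2v-y.
import Mathlib
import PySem

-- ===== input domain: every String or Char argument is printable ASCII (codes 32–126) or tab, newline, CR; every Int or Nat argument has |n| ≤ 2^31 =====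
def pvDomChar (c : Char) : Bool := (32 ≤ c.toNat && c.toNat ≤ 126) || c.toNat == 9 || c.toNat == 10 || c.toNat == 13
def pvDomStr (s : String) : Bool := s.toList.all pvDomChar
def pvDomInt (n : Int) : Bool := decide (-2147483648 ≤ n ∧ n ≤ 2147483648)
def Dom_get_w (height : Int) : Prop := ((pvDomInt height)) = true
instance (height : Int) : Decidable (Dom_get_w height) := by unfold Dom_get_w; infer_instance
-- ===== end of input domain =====

-- B replaces A's inner scan over every column (with its running segment offset) by directly
-- placing the four asterisks of each row into a preallocated list of spaces (objective: simpler).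

-- ===== PORT A =====
-- line is kept as a List Char (Python's str is List Char under PySem); ''-concatenation = list append
def get_w (height : Int) : List String :=
  let width := height * 4 - 3
  let vWidth := PySem.Int.floordiv width 2
  let result : List String := []
  if height ≥ 2 then
    (PySem.List.pyRange 0 height 1).foldl (fun result y =>
      let p := (PySem.List.pyRange 0 width 1).foldl
        (fun (p : List Char × Int) x =>
          let line := p.1 ++ [if x - p.2 = y ∨ x - p.2 = vWidth - y then '*' else ' ']
          let offs := if x = p.2 + vWidth then p.2 + vWidth else p.2
          (line, offs)) ([], 0)
      result ++ [String.mk p.1]) result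
  else result

-- ===== PORT B =====
def get_w_alt (height : Int) : List String :=
  if height < 2 then []
  else
    let width := height * 4 - 3
    let v := PySem.Int.floordiv width 2
    (PySem.List.pyRange 0 height 1).foldl (fun result y =>
      let row := List.replicate width.toNat ' '
      let row := [y, v - y, v + y, 2 * v - y].foldl
        (fun r c => PySem.List.pySetD r c '*') row
      result ++ [String.mk row]) []

-- ===== PRECONDITION & SPEC =====
def Spec_get_w (height : Int) (out : List String) : Prop := out = get_w_alt height
instance (height : Int) (out : List String) : Decidable (Spec_get_w height out) := by unfold Spec_get_w; infer_instance

-- ===== CLAIM (what is proved, stated in full; the proofs are below) =====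
def Claim_equal_get_w : Prop := ∀ (height : Int), Dom_get_w height → Spec_get_w height (get_w height)

-- ===== LEMMAS AND PROOFS =====

-- a fold that only appends one element per step is a map
theorem pv_foldl_app {α β : Type} (g : α → β) (l : List α) (init : List β) :
    l.foldl (fun acc y => acc ++ [g y]) init = init ++ l.map g := by
  induction l generalizing init with
  | nil => simp
  | cons a l ih => simp [ih]

-- the spec character of row y at column x (v = half width)
def pvG (v y x : Int) : Char :=
  if x = y ∨ x = v - y ∨ x = v + y ∨ x = 2 * v - y then '*' else ' '

-- A's segment offset after processing the first t columns
def pvOff (v t : Int) : Int := if t ≤ v then 0 else if t ≤ 2 * v then v else 2 * v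

-- A's inner loop over the first t columns produces exactly the spec characters
theorem pv_innerA (h y v : Int) (hh : 2 ≤ h) (hy0 : 0 ≤ y) (hyh : y < h)
    (hv : v = 2 * h - 2) :
    ∀ t : ℕ, (t : Int) ≤ h * 4 - 3 →
      (PySem.List.pyRange 0 (t : Int) 1).foldl
        (fun (p : List Char × Int) x =>
          let line := p.1 ++ [if x - p.2 = y ∨ x - p.2 = v - y then '*' else ' ']
          let offs := if x = p.2 + v then p.2 + v else p.2
          (line, offs)) ([], 0)
      = ((PySem.List.pyRange 0 (t : Int) 1).map (pvG v y), pvOff v (t : Int)) := by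
  intro t
  induction t with
  | zero =>
    intro _
    simp [PySem.List.pyRange_one_eq_nil, pvOff, hv]
    omega
  | succ t ih =>
    intro hle
    have ht : ((t : Int) ≤ h * 4 - 3) := by push_cast at hle ⊢; omega
    have hsplit : PySem.List.pyRange 0 ((t : ℕ) + 1 : Int) 1
        = PySem.List.pyRange 0 (t : Int) 1 ++ [(t : Int)] := by
      exact PySem.List.pyRange_one_succ_right (by positivity)
    push_cast
    rw [hsplit, List.foldl_append, List.map_append, ih ht]
    simp only [List.foldl_cons, List.foldl_nil, List.map_cons, List.map_nil, Prod.mk.injEq]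
    constructor
    · -- the appended character agrees with pvG
      congr 1
      have hcond : ((t : Int) - pvOff v (t : Int) = y ∨ (t : Int) - pvOff v (t : Int) = v - y)
          ↔ ((t : Int) = y ∨ (t : Int) = v - y ∨ (t : Int) = v + y ∨ (t : Int) = 2 * v - y) := by
        unfold pvOff
        split_ifs <;> omega
      simp only [pvG]
      exact congrArg (fun c => [c]) (if_congr hcond rfl rfl)
    · -- the offset update agrees with pvOff
      unfold pvOff
      split_ifs <;> omega

-- B's row equals the spec characters
theorem pv_rowB (h y v : Int) (hh : 2 ≤ h) (hy0 : 0 ≤ y) (hyh : y < h)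
    (hv : v = 2 * h - 2) :
    [y, v - y, v + y, 2 * v - y].foldl
        (fun r c => PySem.List.pySetD r c '*') (List.replicate (h * 4 - 3).toNat ' ')
      = (PySem.List.pyRange 0 (h * 4 - 3) 1).map (pvG v y) := by
  simp only [List.foldl_cons, List.foldl_nil]
  rw [PySem.List.pySetD_of_nonneg _ _ (by omega),
      PySem.List.pySetD_of_nonneg _ _ (by omega),
      PySem.List.pySetD_of_nonneg _ _ (by omega),
      PySem.List.pySetD_of_nonneg _ _ (by omega)]
  apply List.ext_getElem
  · simp [PySem.List.length_pyRange_one]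
  · intro k hk1 hk2
    have hklen : k < (h * 4 - 3).toNat := by simpa using hk1
    have hkr : k < (PySem.List.pyRange 0 (h * 4 - 3) 1).length := by
      simpa [PySem.List.length_pyRange_one] using hklen
    rw [List.getElem_map, PySem.List.getElem_pyRange_one]
    simp only [List.getElem_set, List.getElem_replicate, pvG, zero_add]
    split_ifs <;> first | rfl | omega

-- a single row of A equals a single row of B
theorem pv_row (h y : Int) (hh : 2 ≤ h) (hy0 : 0 ≤ y) (hyh : y < h) :
    ((PySem.List.pyRange 0 (h * 4 - 3) 1).foldl
        (fun (p : List Char × Int) x =>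
          let line := p.1 ++ [if x - p.2 = y ∨
              x - p.2 = PySem.Int.floordiv (h * 4 - 3) 2 - y then '*' else ' ']
          let offs := if x = p.2 + PySem.Int.floordiv (h * 4 - 3) 2
            then p.2 + PySem.Int.floordiv (h * 4 - 3) 2 else p.2
          (line, offs)) ([], 0)).1
    = [y, PySem.Int.floordiv (h * 4 - 3) 2 - y, PySem.Int.floordiv (h * 4 - 3) 2 + y,
        2 * PySem.Int.floordiv (h * 4 - 3) 2 - y].foldl
        (fun r c => PySem.List.pySetD r c '*') (List.replicate (h * 4 - 3).toNat ' ') := by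
  have hfd : PySem.Int.floordiv (h * 4 - 3) 2 = 2 * h - 2 := by
    rw [PySem.Int.floordiv_eq_ediv_of_pos (by omega)]
    omega
  rw [hfd]
  have hw : h * 4 - 3 = ((h * 4 - 3).toNat : Int) := by omega
  rw [pv_rowB h y (2 * h - 2) hh hy0 hyh rfl]
  conv_lhs => rw [hw]
  rw [pv_innerA h y (2 * h - 2) hh hy0 hyh rfl (h * 4 - 3).toNat (by omega)]
  rw [← hw]

-- ===== VERDICT (by name: the statement is the Claim_ definition above) =====
theorem get_w_spec : Claim_equal_get_w := by
  intro h _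
  unfold Spec_get_w get_w get_w_alt
  by_cases hh : 2 ≤ h
  · rw [if_pos (show h ≥ 2 by omega), if_neg (show ¬ h < 2 by omega)]
    rw [pv_foldl_app, pv_foldl_app, List.nil_append, List.nil_append]
    apply List.map_congr_left
    intro y hy
    rw [PySem.List.mem_pyRange_one] at hy
    simp only
    rw [pv_row h y hh hy.1 hy.2]
  · rw [if_neg (by omega), if_pos (by omega)]
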